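-- pv_equiv track=rewrite | github.com/lin13k/practice | algo_problems/q541-560/q556_wrong.py | printIntAsDigits
-- ===== SOURCE A (Python) =====
-- def printIntAsDigits(n):
--     result = []
--     for i in range(32):
--         if 1 & n >> i == 1:
--             result.insert(0, '1')
--         else:
--             result.insert(0, '0')
--
--     return ''.join(result)
-- ===== SOURCE B (Python) =====
-- def printIntAsDigits(n):
--     return format(n % 0x100000000, '032b')
-- ===== Notes on version B (the rewrite author's own statement) =====
-- stated objective: idiomatic
-- what changed: Replaces the per-bit shift/mask/front-insert loop with a single closed-form call: reduce n modulo two to the thirty-second and format the result as a zero-padded binary string.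
import Mathlib
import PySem

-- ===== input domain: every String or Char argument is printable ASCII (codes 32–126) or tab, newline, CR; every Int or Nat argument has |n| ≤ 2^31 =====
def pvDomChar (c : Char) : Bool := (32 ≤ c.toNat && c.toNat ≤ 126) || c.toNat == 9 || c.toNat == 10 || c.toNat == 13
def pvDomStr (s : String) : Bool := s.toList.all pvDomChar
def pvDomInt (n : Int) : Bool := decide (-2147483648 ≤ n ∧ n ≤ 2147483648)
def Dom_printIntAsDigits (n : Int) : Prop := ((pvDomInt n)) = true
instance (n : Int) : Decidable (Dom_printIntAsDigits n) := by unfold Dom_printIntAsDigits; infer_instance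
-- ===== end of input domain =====

-- B replaces A's per-bit shift/mask/front-insert loop by one closed-form modulo-and-format call.

-- ===== PORT A =====
-- for i in range(32): result.insert(0, '1' if 1 & n >> i == 1 else '0'); return ''.join(result)
-- (i drawn from range(32) is nonnegative, so `n >> i` is ported as `n >>> i.toNat`)
def printIntAsDigits (n : Int) : String :=
  let result := (PySem.List.pyRange 0 32 1).foldl
    (fun result i =>
      if PySem.Int.band 1 (n >>> i.toNat) == 1 then '1' :: result else '0' :: result) []
  String.ofList result

-- ===== PORT B =====
-- fixed-width binary formatting of a Nat, MSB first: port of format(m, '0<k>b') for m < 2^k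
def pvFmtBin : Nat → Nat → List Char
  | 0, _ => []
  | k+1, m => pvFmtBin k (m / 2) ++ [if m % 2 == 1 then '1' else '0']

def printIntAsDigits_alt (n : Int) : String :=
  String.ofList (pvFmtBin 32 (PySem.Int.mod n 4294967296).toNat)

-- ===== PRECONDITION & SPEC =====
def Spec_printIntAsDigits (n : Int) (out : String) : Prop := out = printIntAsDigits_alt n
instance (n : Int) (out : String) : Decidable (Spec_printIntAsDigits n out) := by unfold Spec_printIntAsDigits; infer_instance

-- ===== CLAIM (what is proved, stated in full; the proofs are below) =====
def Claim_equal_printIntAsDigits : Prop := ∀ (n : Int), Dom_printIntAsDigits n → Spec_printIntAsDigits n (printIntAsDigits n)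

-- ===== LEMMAS AND PROOFS =====

-- MSB-cons characterisation of fixed-width binary formatting
theorem pvFmtBin_cons (k : Nat) (m : Nat) :
    pvFmtBin (k+1) m = (if m / 2^k % 2 == 1 then '1' else '0') :: pvFmtBin k m := by
  induction k generalizing m with
  | zero => simp [pvFmtBin]
  | succ k ih =>
    show pvFmtBin (k+1) (m / 2) ++ _ = _
    rw [ih (m / 2), Nat.div_div_eq_div_mul]
    have : 2 * 2^k = 2^(k+1) := by rw [pow_succ]; ring
    simp [pvFmtBin, this]

-- bit k of n (Python's `1 & n >> k`) agrees with bit k of n % 2^32, for k < 32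
theorem pv_bit_eq (n : Int) (k : Nat) (hk : k < 32) :
    (PySem.Int.band 1 (n >>> k) == 1) =
      ((PySem.Int.mod n 4294967296).toNat / 2^k % 2 == 1) := by
  rw [PySem.Int.band_comm, PySem.Int.band_one,
      PySem.Int.mod_eq_emod_of_pos (by norm_num : (0:Int) < 2),
      PySem.Int.mod_eq_emod_of_pos (by norm_num : (0:Int) < 4294967296)]
  have h32 : (4294967296 : Int) = 2^32 := by norm_num
  have hM0 : 0 ≤ n % 4294967296 := Int.emod_nonneg n (by norm_num)
  -- reduce the RHS Nat computation to Int emod arithmetic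
  have hRHS : (((n % 4294967296).toNat / 2^k % 2 : Nat) : Int) = (n % 2^32) / 2^k % 2 := by
    push_cast [Int.toNat_of_nonneg hM0]
    rw [h32]
  have key : (n >>> k) % 2 = (n % 2^32) / 2^k % 2 := by
    rw [Int.shiftRight_eq_div_pow]
    have h232 : (2:Int)^32 = 2^k * 2^(32-k) := by rw [← pow_add]; congr 1; omega
    have hm : n % 2^32 = n - 2^32 * (n / 2^32) := by rw [Int.emod_def]
    rw [hm, h232]
    have hdiv : (n - 2^k * 2^(32-k) * (n / (2^k * 2^(32-k)))) / 2^k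
        = n / 2^k - 2^(32-k) * (n / (2^k * 2^(32-k))) := by
      rw [sub_eq_add_neg,
        show -(2^k * 2^(32-k) * (n / (2^k * 2^(32-k))))
          = (-(2^(32-k) * (n / (2^k * 2^(32-k))))) * 2^k by ring,
        Int.add_mul_ediv_right _ _ (by positivity : (2:Int)^k ≠ 0)]
      ring
    rw [hdiv]
    obtain ⟨c, hc⟩ : (2:Int) ∣ 2^(32-k) := dvd_pow_self 2 (by omega)
    rw [hc, show n / 2^k - 2*c * (n / (2^k * (2*c)))
        = n / 2^k + (-(c * (n / (2^k * (2*c))))) * 2 by ring,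
      Int.add_mul_emod_self_right]
    push_cast
    rfl
  rw [show ((n >>> k) % 2 == 1) = decide ((n >>> k) % 2 = 1) from rfl,
      show ((n % 4294967296).toNat / 2^k % 2 == 1)
        = decide ((n % 4294967296).toNat / 2^k % 2 = 1) from rfl,
      decide_eq_decide, key]
  omega

-- the loop over range(k) builds exactly the k-bit formatting of n % 2^32
theorem pv_fold_eq (n : Int) (k : Nat) (hk : k ≤ 32) :
    (PySem.List.pyRange 0 k 1).foldl
      (fun result i =>
        if PySem.Int.band 1 (n >>> i.toNat) == 1 then '1' :: result else '0' :: result) []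
    = pvFmtBin k (PySem.Int.mod n 4294967296).toNat := by
  induction k with
  | zero => simp [pvFmtBin]
  | succ k ih =>
    have hrange : PySem.List.pyRange 0 (k+1 : Nat) 1
        = PySem.List.pyRange 0 k 1 ++ [(k : Int)] := by
      have := PySem.List.pyRange_one_succ_right (a := 0) (b := (k : Int)) (by positivity)
      simpa using this
    rw [hrange, List.foldl_append, ih (by omega), List.foldl_cons, List.foldl_nil,
        pvFmtBin_cons]
    simp only [Int.toNat_natCast, Int.shiftRight_natCast_right]
    rw [pv_bit_eq n k (by omega)]
    simp only [beq_iff_eq]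
    split_ifs <;> rfl

-- ===== VERDICT (by name: the statement is the Claim_ definition above) =====
theorem printIntAsDigits_spec : Claim_equal_printIntAsDigits := by
  intro n _
  show printIntAsDigits n = printIntAsDigits_alt n
  exact congrArg String.ofList (pv_fold_eq n 32 le_rfl)
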